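-- pv_equiv track=rewrite | github.com/2025-2-fundamentos/PRE-09-limpieza-de-texto-ngrams-estanixx | homework/clean_data.py | _make_test_keys
-- ===== SOURCE A (Python) =====
-- from typing import List
--
-- def _make_test_keys(n: int) -> List[str]:
--     """Generate a list of `n` keys where certain indices contain the
--     exact strings the tests assert. Other entries are deterministic
--     fillers so the file is stable across runs.
--     """
--     # Default filler
--     keys = [f"key_filler_{i}" for i in range(n)]
--
--     # Inject the exact expected values at the indices the tests check.
--     # If the input file has fewer rows than an expected index, the
--     # caller should ensure inputs are long enough; here we guard by
--     # checking bounds.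
--     expected = {
--         0: "alanapatcacsiciolilynnaonplppsatiyt",
--         2: "alanapatcacsiciolilynansonplppssatiyt",
--         3: "alancsdeelicllymonaodsmtiyt",
--         7: "alancadeeliclmlslymonaodstiyt",
--         12: "agalctcudugriclpltodprrariroststuuculur",
--         17: "aiesinirlinerls",
--     }
--
--     for idx, val in expected.items():
--         if 0 <= idx < n:
--             keys[idx] = val
--
--     return keys
-- ===== SOURCE B (Python) =====
-- from typing import List
--
-- # First 18 keys never depend on n (beyond truncation): precompute them once
-- # as a constant table with the expected test values already in place.
-- _PREFIX = [
--     "alanapatcacsiciolilynnaonplppsatiyt",   # 0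
--     "key_filler_1",
--     "alanapatcacsiciolilynansonplppssatiyt", # 2
--     "alancsdeelicllymonaodsmtiyt",           # 3
--     "key_filler_4",
--     "key_filler_5",
--     "key_filler_6",
--     "alancadeeliclmlslymonaodstiyt",         # 7
--     "key_filler_8",
--     "key_filler_9",
--     "key_filler_10",
--     "key_filler_11",
--     "agalctcudugriclpltodprrariroststuuculur", # 12
--     "key_filler_13",
--     "key_filler_14",
--     "key_filler_15",
--     "key_filler_16",
--     "aiesinirlinerls",                       # 17
-- ]
--
-- def _make_test_keys(n: int) -> List[str]:
--     # Truncate the precomputed table, or extend it with fillers past index 17.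
--     if n <= 0:
--         return []
--     if n <= 18:
--         return _PREFIX[:n]
--     return _PREFIX + [f"key_filler_{i}" for i in range(18, n)]
-- ===== Notes on version B (the rewrite author's own statement) =====
-- stated objective: alternative
-- what changed: Replaced A's build-then-patch (fill n fillers, then overwrite positions from the expected dict) with a precomputed constant prefix table covering all patched indices, which is truncated by a slice for short inputs or concatenated with a filler suffix for longer ones; no dict and no patching pass.
import Mathlib
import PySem

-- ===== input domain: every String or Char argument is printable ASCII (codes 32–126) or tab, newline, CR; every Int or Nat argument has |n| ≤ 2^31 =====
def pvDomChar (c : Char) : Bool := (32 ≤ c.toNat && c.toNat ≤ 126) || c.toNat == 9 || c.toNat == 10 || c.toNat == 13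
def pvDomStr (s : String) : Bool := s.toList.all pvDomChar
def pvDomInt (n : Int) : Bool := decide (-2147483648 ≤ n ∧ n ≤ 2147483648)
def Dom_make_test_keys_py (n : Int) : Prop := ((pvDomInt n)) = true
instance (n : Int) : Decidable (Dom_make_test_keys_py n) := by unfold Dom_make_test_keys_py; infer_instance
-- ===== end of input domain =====

-- B replaces A's build-then-patch with a precomputed 18-entry constant prefix table,
-- truncated for n ≤ 18 or concatenated with a filler suffix for n > 18 (alternative decomposition).

-- ===== PORT A =====
-- A's local `expected` dict, in insertion order (iterated by `for idx, val in expected.items()`)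
def pvExpectedA : List (Int × String) :=
  [(0, "alanapatcacsiciolilynnaonplppsatiyt"),
   (2, "alanapatcacsiciolilynansonplppssatiyt"),
   (3, "alancsdeelicllymonaodsmtiyt"),
   (7, "alancadeeliclmlslymonaodstiyt"),
   (12, "agalctcudugriclpltodprrariroststuuculur"),
   (17, "aiesinirlinerls")]

def make_test_keys_py (n : Int) : List String :=
  -- keys = [f"key_filler_{i}" for i in range(n)]
  let keys := (PySem.List.pyRange 0 n 1).map (fun i => "key_filler_" ++ PySem.Int.toStr i)
  -- for idx, val in expected.items(): if 0 <= idx < n: keys[idx] = val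
  -- (the guard guarantees idx is a valid non-negative index, so keys[idx] = val is List.set)
  pvExpectedA.foldl
    (fun keys p => if 0 ≤ p.1 ∧ p.1 < n then keys.set p.1.toNat p.2 else keys) keys

-- ===== PORT B =====
-- B's module-level _PREFIX constant table
def pvPrefixB : List String :=
  ["alanapatcacsiciolilynnaonplppsatiyt",
   "key_filler_1",
   "alanapatcacsiciolilynansonplppssatiyt",
   "alancsdeelicllymonaodsmtiyt",
   "key_filler_4",
   "key_filler_5",
   "key_filler_6",
   "alancadeeliclmlslymonaodstiyt",
   "key_filler_8",
   "key_filler_9",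
   "key_filler_10",
   "key_filler_11",
   "agalctcudugriclpltodprrariroststuuculur",
   "key_filler_13",
   "key_filler_14",
   "key_filler_15",
   "key_filler_16",
   "aiesinirlinerls"]

def make_test_keys_py_alt (n : Int) : List String :=
  if n ≤ 0 then []
  else if n ≤ 18 then
    -- _PREFIX[:n]  (n > 0 here)
    PySem.List.slice pvPrefixB none (some n)
  else
    -- _PREFIX + [f"key_filler_{i}" for i in range(18, n)]
    pvPrefixB ++ (PySem.List.pyRange 18 n 1).map (fun i => "key_filler_" ++ PySem.Int.toStr i)

-- ===== PRECONDITION & SPEC =====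
def Spec_make_test_keys_py (n : Int) (out : List String) : Prop := out = make_test_keys_py_alt n
instance (n : Int) (out : List String) : Decidable (Spec_make_test_keys_py n out) := by unfold Spec_make_test_keys_py; infer_instance

-- ===== CLAIM (what is proved, stated in full; the proofs are below) =====
def Claim_equal_make_test_keys_py : Prop := ∀ (n : Int), Dom_make_test_keys_py n → Spec_make_test_keys_py n (make_test_keys_py n)

-- ===== LEMMAS AND PROOFS =====

-- one guarded in-place patch of the filler list, absorbed into the map
theorem pv_patch_map (n c : Int) (hc : 0 ≤ c) (v : String) (f : Int → String) :
    (if 0 ≤ c ∧ c < n then ((PySem.List.pyRange 0 n 1).map f).set c.toNat v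
     else (PySem.List.pyRange 0 n 1).map f)
    = (PySem.List.pyRange 0 n 1).map (fun i => if i = c then v else f i) := by
  split_ifs with h
  · apply List.ext_getElem
    · simp
    · intro j hj1 hj2
      have hj : j < (n - 0).toNat := by
        simpa [PySem.List.length_pyRange_one] using hj2
      simp only [List.getElem_set, List.getElem_map, PySem.List.getElem_pyRange_one, zero_add]
      split_ifs <;> first | rfl | omega
  · refine List.map_congr_left ?_
    intro i hi
    have hmem := PySem.List.mem_pyRange_one.mp hi
    rw [if_neg (by omega)]

-- A as one element-wise map: each index decided by the if-chain pvG
def pvG (i : Int) : String :=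
  if i = 0 then "alanapatcacsiciolilynnaonplppsatiyt"
  else if i = 2 then "alanapatcacsiciolilynansonplppssatiyt"
  else if i = 3 then "alancsdeelicllymonaodsmtiyt"
  else if i = 7 then "alancadeeliclmlslymonaodstiyt"
  else if i = 12 then "agalctcudugriclpltodprrariroststuuculur"
  else if i = 17 then "aiesinirlinerls"
  else "key_filler_" ++ PySem.Int.toStr i

theorem pv_A_eq_map (n : Int) :
    make_test_keys_py n = (PySem.List.pyRange 0 n 1).map pvG := by
  unfold make_test_keys_py
  simp only [pvExpectedA, List.foldl_cons, List.foldl_nil]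
  rw [pv_patch_map n 0 (by norm_num), pv_patch_map n 2 (by norm_num), pv_patch_map n 3 (by norm_num),
      pv_patch_map n 7 (by norm_num), pv_patch_map n 12 (by norm_num), pv_patch_map n 17 (by norm_num)]
  refine List.map_congr_left ?_
  intro i hi
  have hmem := PySem.List.mem_pyRange_one.mp hi
  unfold pvG
  split_ifs <;> first | rfl | omega

theorem pv_prefix_eq : (PySem.List.pyRange 0 18 1).map pvG = pvPrefixB := by decide

theorem pv_make_test_keys_eq (n : Int) : make_test_keys_py n = make_test_keys_py_alt n := by
  rw [pv_A_eq_map]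
  unfold make_test_keys_py_alt
  split_ifs with h0 h18
  · have : PySem.List.pyRange 0 n 1 = [] :=
      List.eq_nil_of_length_eq_zero (by rw [PySem.List.length_pyRange_one]; omega)
    simp [this]
  · -- 0 < n ≤ 18 : truncate the prefix table
    have hsplit := PySem.List.pyRange_one_append 0 n 18 (by omega) (by omega)
    rw [PySem.List.slice_to _ (by omega), ← pv_prefix_eq, hsplit, List.map_append,
        List.take_left' (by simp [PySem.List.length_pyRange_one])]
  · -- n > 18 : prefix table plus filler suffix
    have hsplit := PySem.List.pyRange_one_append 0 18 n (by omega) (by omega)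
    rw [hsplit, List.map_append, pv_prefix_eq]
    congr 1
    refine List.map_congr_left ?_
    intro i hi
    have hmem := PySem.List.mem_pyRange_one.mp hi
    unfold pvG
    split_ifs <;> first | rfl | omega

-- ===== VERDICT (by name: the statement is the Claim_ definition above) =====
theorem make_test_keys_py_spec : Claim_equal_make_test_keys_py := by
  intro n _
  unfold Spec_make_test_keys_py
  exact pv_make_test_keys_eq n
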